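-- pv_equiv track=rewrite | github.com/threefoldtech/jumpscale_portal_classic | JumpscalePortalClassic/portal/docpreprocessor/PortalDocParser.py | _normalizeDescr
-- ===== SOURCE A (Python) =====
-- def _normalizeDescr(text):
--     text = text.lower()
--     splitat = ["{", "(", "[", "#", "%", "$", "'"]
--     for tosplit in splitat:
--         if len(text.split(tosplit)) > 0:
--             text = text.split(tosplit)[0]
--     text = text.replace(",", "")
--     text = text.replace(":", "")
--     text = text.replace(";", "")
--     text = text.replace("  ", " ")
--     if text != "" and text[-1] == " ":
--         text = text[:-1]
--     text = text.replace("-", "")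
--     text = text.replace("_", "")
--     return text
-- ===== SOURCE B (Python) =====
-- def _normalizeDescr(text):
-- # alternative decomposition: one explicit scan instead of A's chain of split/replace passes
--     # single left-to-right char scan instead of A's chain of split/replace passes
--     DELIMS = "{([#%$'"
--     kept = []
--     for ch in text.lower():
--         if ch in DELIMS:
--             break          # truncate at the earliest delimiter
--         if ch not in ",:;":
--             kept.append(ch)
--     out = []
--     i = 0
--     n = len(kept)
--     while i < n:           # one non-overlapping pass collapsing space pairs
--         if kept[i] == " " and i + 1 < n and kept[i + 1] == " ":
--             out.append(" ")
--             i += 2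
--         else:
--             out.append(kept[i])
--             i += 1
--     if out and out[-1] == " ":
--         out.pop()
--     return "".join(ch for ch in out if ch not in "-_")
-- ===== Notes on version B (the rewrite author's own statement) =====
-- stated objective: alternative
-- what changed: Replaces A's chain of split()/replace() whole-string passes (one split per delimiter, one replace per punctuation character) with a single left-to-right character scan that truncates at the first delimiter and drops the punctuation characters on the way, followed by one explicit index loop collapsing space pairs; it trades A's many library passes for explicit one-pass loops.
import Mathlib
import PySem

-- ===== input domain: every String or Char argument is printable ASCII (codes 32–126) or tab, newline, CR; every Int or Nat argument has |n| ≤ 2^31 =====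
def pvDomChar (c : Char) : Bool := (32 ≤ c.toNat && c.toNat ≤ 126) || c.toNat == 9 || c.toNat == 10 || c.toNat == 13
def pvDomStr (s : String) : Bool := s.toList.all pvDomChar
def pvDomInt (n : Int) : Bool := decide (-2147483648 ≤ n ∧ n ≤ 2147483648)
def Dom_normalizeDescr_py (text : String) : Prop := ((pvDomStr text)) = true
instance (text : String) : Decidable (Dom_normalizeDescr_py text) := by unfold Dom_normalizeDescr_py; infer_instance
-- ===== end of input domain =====

-- B replaces A's chain of split()/replace() string passes by a single character scan plus
-- one explicit pair-collapsing pass (objective: alternative one-pass decomposition).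

-- ===== PORT A =====
-- literal transliteration of A on the code-point list (splitat loop as a foldl over the literal list)
def normalizeDescr_py (text : String) : String :=
  let t0 := PySem.Chars.lower text.toList
  -- for tosplit in splitat: if len(text.split(tosplit)) > 0: text = text.split(tosplit)[0]
  -- (the [0] indexing is ported with pyGetD; split never returns an empty list, so the
  --  default is unreachable)
  let t1 := ['{', '(', '[', '#', '%', '$', '\''].foldl
    (fun t d =>
      if 0 < (PySem.Chars.splitOn t [d]).length then
        PySem.List.pyGetD (PySem.Chars.splitOn t [d]) 0 []
      else t) t0
  let t2 := PySem.Chars.replace t1 [','] []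
  let t3 := PySem.Chars.replace t2 [':'] []
  let t4 := PySem.Chars.replace t3 [';'] []
  let t5 := PySem.Chars.replace t4 [' ', ' '] [' ']
  let t6 := if t5 ≠ [] ∧ PySem.List.pyGet? t5 (-1) = some ' ' then
              PySem.List.slice t5 none (some (-1)) else t5
  let t7 := PySem.Chars.replace t6 ['-'] []
  let t8 := PySem.Chars.replace t7 ['_'] []
  String.ofList t8

-- ===== PORT B =====
-- the for-loop of Source B: break at the first delimiter, drop ',' ':' ';' on the way
def pvScan : List Char → List Char
  | [] => []
  | c :: t =>
      if c ∈ ['{', '(', '[', '#', '%', '$', '\''] then []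
      else if c ∈ [',', ':', ';'] then pvScan t
      else c :: pvScan t

-- the while-loop of Source B: non-overlapping collapse of "  " pairs, left to right
def pvCollapse : List Char → List Char
  | [] => []
  | [c] => [c]
  | c₁ :: c₂ :: t =>
      if c₁ = ' ' ∧ c₂ = ' ' then ' ' :: pvCollapse t
      else c₁ :: pvCollapse (c₂ :: t)

def normalizeDescr_py_alt (text : String) : String :=
  let kept := pvScan (PySem.Chars.lower text.toList)
  let out := pvCollapse kept
  let out2 := if out ≠ [] ∧ PySem.List.pyGet? out (-1) = some ' ' then out.dropLast else out
  String.ofList (out2.filter (fun c => !(c ∈ ['-', '_'])))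

-- ===== PRECONDITION & SPEC =====
def Spec_normalizeDescr_py (text : String) (out : String) : Prop := out = normalizeDescr_py_alt text
instance (text : String) (out : String) : Decidable (Spec_normalizeDescr_py text out) := by unfold Spec_normalizeDescr_py; infer_instance

-- ===== CLAIM (what is proved, stated in full; the proofs are below) =====
def Claim_equal_normalizeDescr_py : Prop := ∀ (text : String), Dom_normalizeDescr_py text → Spec_normalizeDescr_py text (normalizeDescr_py text)

-- ===== LEMMAS AND PROOFS =====

-- head of splitOn.go when the accumulator is already non-empty: the first piece is fixed
lemma pv_splitOn_go_head_acc (sep : List Char) (fuel : Nat) :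
    ∀ (l cur : List Char) (acc : List (List Char)), acc ≠ [] →
      (PySem.Chars.splitOn.go sep fuel l cur acc).head? = acc.getLast? := by
  induction fuel with
  | zero =>
      intro l cur acc h
      obtain ⟨a, acc', rfl⟩ := List.exists_cons_of_ne_nil h
      simp [PySem.Chars.splitOn.go, List.head?_reverse]
      rw [List.getLast?_cons]
  | succ fuel ih =>
      intro l cur acc h
      obtain ⟨a, acc', rfl⟩ := List.exists_cons_of_ne_nil h
      cases l with
      | nil =>
          simp [PySem.Chars.splitOn.go, List.head?_reverse]
          rw [List.getLast?_cons]
      | cons c t =>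
          simp only [PySem.Chars.splitOn.go]
          split
          · rw [ih _ _ _ (by simp)]
            simp [List.getLast?_cons_cons]
          · exact ih _ _ _ (by simp)

-- head of splitOn.go for a single-char separator and empty accumulator = first piece
lemma pv_splitOn_go_head (d : Char) (fuel : Nat) :
    ∀ (l cur : List Char), l.length ≤ fuel →
      (PySem.Chars.splitOn.go [d] fuel l cur []).head? =
        some (cur.reverse ++ l.takeWhile (fun c => c ≠ d)) := by
  induction fuel with
  | zero =>
      intro l cur h
      have : l = [] := List.eq_nil_of_length_eq_zero (Nat.le_zero.mp h)
      subst this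
      simp [PySem.Chars.splitOn.go]
  | succ fuel ih =>
      intro l cur h
      cases l with
      | nil => simp [PySem.Chars.splitOn.go]
      | cons c t =>
          simp only [PySem.Chars.splitOn.go]
          split
          · rename_i hp
            have hcd : c = d := by simp [List.isPrefixOf] at hp; tauto
            subst hcd
            rw [pv_splitOn_go_head_acc _ _ _ _ _ (by simp)]
            simp
          · rename_i hp
            have hcd : c ≠ d := by
              intro hc; subst hc
              exact hp (by simp [List.isPrefixOf])
            rw [ih t (c :: cur) (by simpa using Nat.le_of_succ_le_succ h)]
            simp [hcd]

-- A's loop body for one delimiter is truncation at that delimiter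
lemma pv_stepA (t : List Char) (d : Char) :
    (if 0 < (PySem.Chars.splitOn t [d]).length then
        PySem.List.pyGetD (PySem.Chars.splitOn t [d]) 0 []
      else t) = t.takeWhile (fun c => c ≠ d) := by
  have hh : (PySem.Chars.splitOn t [d]).head? = some (t.takeWhile (fun c => c ≠ d)) := by
    unfold PySem.Chars.splitOn
    simpa using pv_splitOn_go_head d (t.length + 1) t [] (by omega)
  obtain ⟨x, xs, hx⟩ : ∃ x xs, PySem.Chars.splitOn t [d] = x :: xs := by
    cases hc : PySem.Chars.splitOn t [d] with
    | nil => rw [hc] at hh; simp at hh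
    | cons x xs => exact ⟨x, xs, rfl⟩
  rw [hx] at hh ⊢
  simp only [List.head?_cons, Option.some.injEq] at hh
  simp [PySem.List.pyGetD, PySem.List.pyGet?, PySem.List.pyIdx?, hh]

-- replace of a single char by "" is a filter
lemma pv_replace_go_filter (d : Char) (new : List Char) (hnew : new = []) (fuel : Nat) :
    ∀ (l acc : List Char), l.length ≤ fuel →
      PySem.Chars.replace.go [d] new fuel l acc = acc.reverse ++ l.filter (fun c => c ≠ d) := by
  subst hnew
  induction fuel with
  | zero =>
      intro l acc h
      have : l = [] := List.eq_nil_of_length_eq_zero (Nat.le_zero.mp h)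
      subst this
      simp [PySem.Chars.replace.go]
  | succ fuel ih =>
      intro l acc h
      cases l with
      | nil => simp [PySem.Chars.replace.go]
      | cons c t =>
          simp only [PySem.Chars.replace.go]
          split
          · rename_i hp
            have hcd : c = d := by simp [List.isPrefixOf] at hp; tauto
            subst hcd
            rw [ih _ _ (by simpa using Nat.le_of_succ_le_succ h)]
            simp
          · rename_i hp
            have hcd : c ≠ d := by
              intro hc; subst hc
              exact hp (by simp [List.isPrefixOf])
            rw [ih t (c :: acc) (by simpa using Nat.le_of_succ_le_succ h)]
            simp [hcd]

lemma pv_replace_filter (d : Char) (l : List Char) :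
    PySem.Chars.replace l [d] [] = l.filter (fun c => c ≠ d) := by
  unfold PySem.Chars.replace
  simpa using pv_replace_go_filter d [] rfl l.length l [] (le_refl _)

-- replace "  " " " is exactly Source B's pair-collapsing pass
lemma pv_replace_go_collapse (fuel : Nat) :
    ∀ (l acc : List Char), l.length ≤ fuel →
      PySem.Chars.replace.go [' ', ' '] [' '] fuel l acc = acc.reverse ++ pvCollapse l := by
  induction fuel with
  | zero =>
      intro l acc h
      have : l = [] := List.eq_nil_of_length_eq_zero (Nat.le_zero.mp h)
      subst this
      simp [PySem.Chars.replace.go, pvCollapse]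
  | succ fuel ih =>
      intro l acc h
      cases l with
      | nil => simp [PySem.Chars.replace.go, pvCollapse]
      | cons c t =>
          simp only [PySem.Chars.replace.go]
          split
          · rename_i hp
            obtain ⟨t', rfl, rfl⟩ : ∃ t', c = ' ' ∧ t = ' ' :: t' := by
              cases t with
              | nil => simp [List.isPrefixOf] at hp
              | cons c₂ t' =>
                  simp [List.isPrefixOf] at hp
                  obtain ⟨h1, h2⟩ := hp
                  exact ⟨t', h1.symm, by rw [← h2]⟩
            rw [ih _ _ (by simp at h ⊢; omega)]
            simp [pvCollapse]
          · rename_i hp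
            rw [ih t (c :: acc) (by simpa using Nat.le_of_succ_le_succ h)]
            cases t with
            | nil => simp [pvCollapse]
            | cons c₂ t' =>
                have hns : ¬ (c = ' ' ∧ c₂ = ' ') := by
                  intro ⟨h1, h2⟩; subst h1; subst h2
                  exact hp (by simp [List.isPrefixOf])
                simp [pvCollapse, hns]

lemma pv_replace_collapse (l : List Char) :
    PySem.Chars.replace l [' ', ' '] [' '] = pvCollapse l := by
  unfold PySem.Chars.replace
  simpa using pv_replace_go_collapse l.length l [] (le_refl _)

-- B's scan = A's truncation followed by A's punctuation filters
lemma pv_scan_eq (l : List Char) :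
    pvScan l =
      (l.takeWhile (fun c => !(c ∈ ['{', '(', '[', '#', '%', '$', '\'']))).filter
        (fun c => !(c ∈ [',', ':', ';'])) := by
  induction l with
  | nil => simp [pvScan]
  | cons c t ih =>
      rw [pvScan, List.takeWhile_cons]
      by_cases hd : c ∈ ['{', '(', '[', '#', '%', '$', '\'']
      · rw [if_pos hd,
          if_neg (show ¬ ((!decide (c ∈ ['{', '(', '[', '#', '%', '$', '\''])) = true) by simp [hd])]
        simp
      · rw [if_neg hd,
          if_pos (show (!decide (c ∈ ['{', '(', '[', '#', '%', '$', '\''])) = true by simp [hd]),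
          List.filter_cons]
        by_cases hp : c ∈ [',', ':', ';']
        · rw [if_pos hp, if_neg (show ¬ ((!decide (c ∈ [',', ':', ';'])) = true) by simp [hp]), ih]
        · rw [if_neg hp, if_pos (show (!decide (c ∈ [',', ':', ';'])) = true by simp [hp]), ih]

-- ===== VERDICT (by name: the statement is the Claim_ definition above) =====
theorem normalizeDescr_py_spec : Claim_equal_normalizeDescr_py := by
  intro text _
  show normalizeDescr_py text = normalizeDescr_py_alt text
  unfold normalizeDescr_py normalizeDescr_py_alt
  have hsl : ∀ l : List Char, PySem.List.slice l none (some (-1)) = l.dropLast :=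
    fun l => by simp [pysem]
  simp [hsl, List.foldl, pv_stepA, pv_replace_filter, pv_replace_collapse, pv_scan_eq,
    List.takeWhile_takeWhile, List.filter_filter, Bool.and_comm, Bool.and_left_comm, Bool.and_assoc]
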